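-- pv_equiv track=rewrite | github.com/jgamblin/march-ml | scripts/simulate_bracket.py | build_64_from_68
-- ===== SOURCE A (Python) =====
-- def build_64_from_68(bracket_records, ff_winners):
--     """Substitute First Four winners into their slots and return 64-team ordered list.
--
--     bracket_records: all 68 bracket records sorted by slot.
--     ff_winners: dict {slot: winner_team_name} for the 4 First Four slots.
--     """
--     from collections import Counter as _C
--     slot_counts = _C(r['slot'] for r in bracket_records)
--     ff_slots = {s for s, c in slot_counts.items() if c == 2}
--
--     result = []
--     visited = set()
--     for r in sorted(bracket_records, key=lambda x: x['slot']):
--         s = r['slot']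
--         if s in ff_slots:
--             if s not in visited:
--                 result.append(ff_winners[s])
--                 visited.add(s)
--             # Skip second entry for this slot — winner already added
--         else:
--             result.append(r['team'])
--     return result
-- ===== SOURCE B (Python) =====
-- def build_64_from_68(bracket_records, ff_winners):
--     """Substitute First Four winners into their slots and return 64-team ordered list.
--
--     Single pass over the sorted records, grouping equal-slot runs; a run of
--     exactly two records is a First Four slot and contributes its winner once.
--     """
--     recs = sorted(bracket_records, key=lambda r: r['slot'])
--     result = []
--     i, n = 0, len(recs)
--     while i < n:
--         s = recs[i]['slot']
--         j = i + 1
--         while j < n and recs[j]['slot'] == s: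
--             j += 1
--         if j - i == 2:
--             result.append(ff_winners[s])
--         else:
--             result.extend(r['team'] for r in recs[i:j])
--         i = j
--     return result
-- ===== Notes on version B (the rewrite author's own statement) =====
-- stated objective: alternative
-- what changed: A's Counter pass, ff_slots set and visited-set bookkeeping are replaced by a single run-grouping pass over the sorted records: a maximal run of equal-slot records of length exactly 2 emits the First Four winner once, any other run emits its teams in order.
import Mathlib
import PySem

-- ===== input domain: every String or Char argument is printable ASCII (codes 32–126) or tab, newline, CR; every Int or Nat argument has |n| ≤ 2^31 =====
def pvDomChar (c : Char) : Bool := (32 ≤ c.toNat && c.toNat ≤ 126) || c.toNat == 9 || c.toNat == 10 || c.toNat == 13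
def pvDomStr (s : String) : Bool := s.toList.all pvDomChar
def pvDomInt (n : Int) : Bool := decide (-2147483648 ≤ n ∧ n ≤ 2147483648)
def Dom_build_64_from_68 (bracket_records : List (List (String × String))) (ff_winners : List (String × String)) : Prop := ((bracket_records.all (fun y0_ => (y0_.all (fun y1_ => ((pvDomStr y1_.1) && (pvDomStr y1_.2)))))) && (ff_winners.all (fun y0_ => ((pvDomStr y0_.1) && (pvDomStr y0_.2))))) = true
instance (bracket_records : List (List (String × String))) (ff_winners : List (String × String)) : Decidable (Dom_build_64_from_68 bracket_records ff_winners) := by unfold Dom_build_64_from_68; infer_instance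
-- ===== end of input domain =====

-- B replaces A's Counter + visited-set bookkeeping by one run-grouping pass over the
-- sorted records (a run of exactly two records is a First Four slot): simpler, same cost.

-- shared record accessors (r['slot'] / r['team']; the .getD "" default is unreachable
-- under Pre_, where every lookup succeeds exactly as in the Python)
def pvSlotOf (r : List (String × String)) : String := ((PySem.Dict.mk r).get? "slot").getD ""
def pvTeamOf (r : List (String × String)) : String := ((PySem.Dict.mk r).get? "team").getD ""

-- ===== PORT A =====
def pvFFslots (bracket_records : List (List (String × String))) : PySem.Set String :=
  PySem.Set.ofList (((PySem.Dict.counter (bracket_records.map pvSlotOf)).items.filter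
    (fun p => p.2 == 2)).map (fun p => p.1))

def pvStepA (ffset : PySem.Set String) (ff_winners : List (String × String))
    (st : List String × PySem.Set String) (r : List (String × String)) :
    List String × PySem.Set String :=
  let s := pvSlotOf r
  if ffset.contains s then
    if st.2.contains s then st
    else (st.1 ++ [((PySem.Dict.mk ff_winners).get? s).getD ""], PySem.Set.add st.2 s)
  else (st.1 ++ [pvTeamOf r], st.2)

def build_64_from_68 (bracket_records : List (List (String × String))) (ff_winners : List (String × String)) : List String :=
  let ff_slots := pvFFslots bracket_records
  ((PySem.List.sorted bracket_records pvSlotOf false).foldl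
    (pvStepA ff_slots ff_winners) ([], PySem.Set.empty)).1

-- ===== PORT B =====
-- Source B's outer while-loop: each step peels one run of equal-slot records off the
-- sorted list (the inner while-scan is the takeWhile/dropWhile pair) and emits its output.
def pvRuns (ff_winners : List (String × String)) :
    List (List (String × String)) → List String
  | [] => []
  | r :: rest =>
    let s := pvSlotOf r
    let run := rest.takeWhile (fun r' => pvSlotOf r' == s)
    let rest' := rest.dropWhile (fun r' => pvSlotOf r' == s)
    (if run.length + 1 == 2 then [((PySem.Dict.mk ff_winners).get? s).getD ""]
     else (r :: run).map pvTeamOf) ++ pvRuns ff_winners rest'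
termination_by l => l.length
decreasing_by
  have h := (List.dropWhile_sublist (l := rest) (fun r' => pvSlotOf r' == pvSlotOf r)).length_le
  simp only [List.length_cons]
  omega

def build_64_from_68_alt (bracket_records : List (List (String × String))) (ff_winners : List (String × String)) : List String :=
  pvRuns ff_winners (PySem.List.sorted bracket_records pvSlotOf false)

-- ===== PRECONDITION & SPEC =====
-- Pre_ excludes exactly the inputs on which the Python A raises KeyError: a record
-- without a 'slot' key, a slot occurring exactly twice that is missing from ff_winners,
-- or a record of any other slot without a 'team' key. (B raises there too.)
def Pre_build_64_from_68 (bracket_records : List (List (String × String))) (ff_winners : List (String × String)) : Prop :=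
  ∀ r ∈ bracket_records,
    ((PySem.Dict.mk r).get? "slot").isSome = true ∧
    (if (bracket_records.map pvSlotOf).count (pvSlotOf r) = 2
     then ((PySem.Dict.mk ff_winners).get? (pvSlotOf r)).isSome = true
     else ((PySem.Dict.mk r).get? "team").isSome = true)
instance (bracket_records : List (List (String × String))) (ff_winners : List (String × String)) : Decidable (Pre_build_64_from_68 bracket_records ff_winners) := by unfold Pre_build_64_from_68; infer_instance

def pvWitness_build_64_from_68 : (List (List (String × String))) × (List (String × String)) :=
  ([[("slot", "a"), ("team", "x")], [("slot", "b"), ("team", "y")], [("slot", "b"), ("team", "z")]],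
   [("b", "w")])

def Spec_build_64_from_68 (bracket_records : List (List (String × String))) (ff_winners : List (String × String)) (out : List String) : Prop := out = build_64_from_68_alt bracket_records ff_winners
instance (bracket_records : List (List (String × String))) (ff_winners : List (String × String)) (out : List String) : Decidable (Spec_build_64_from_68 bracket_records ff_winners out) := by unfold Spec_build_64_from_68; infer_instance

-- ===== CLAIM (what is proved, stated in full; the proofs are below) =====
def Claim_equal_build_64_from_68 : Prop := ∀ (bracket_records : List (List (String × String))) (ff_winners : List (String × String)), Dom_build_64_from_68 bracket_records ff_winners → Pre_build_64_from_68 bracket_records ff_winners → Spec_build_64_from_68 bracket_records ff_winners (build_64_from_68 bracket_records ff_winners)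

-- ===== LEMMAS AND PROOFS =====

-- membership in A's ff_slots set is exactly "this slot occurs twice in bracket_records"
lemma pvFFslots_contains_iff (br : List (List (String × String))) (s : String) :
    (pvFFslots br).contains s = true ↔ (br.map pvSlotOf).count s = 2 := by
  rw [PySem.Set.contains_iff, pvFFslots, PySem.Set.mem_ofList]
  simp only [PySem.Dict.items_counter, List.mem_map, List.mem_filter]
  constructor
  · rintro ⟨p, ⟨⟨k, hk, rfl⟩, h2⟩, rfl⟩
    exact_mod_cast (by simpa using h2 : ((List.count k (List.map pvSlotOf br) : Int)) = 2)
  · intro h2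
    refine ⟨(s, ((br.map pvSlotOf).count s : Int)), ⟨⟨s, ?_, rfl⟩, by simp; exact_mod_cast h2⟩, rfl⟩
    rw [PySem.Set.mem_ofList]
    exact List.count_pos_iff.mp (by omega)

-- a fold of pvStepA over records none of whose slots are First Four slots appends the teams
lemma foldA_no_ff (ffset : PySem.Set String) (ff : List (String × String))
    (m : List (List (String × String))) (acc : List String) (vis : PySem.Set String)
    (h : ∀ x ∈ m, ffset.contains (pvSlotOf x) = false) :
    m.foldl (pvStepA ffset ff) (acc, vis) = (acc ++ m.map pvTeamOf, vis) := by
  induction m generalizing acc with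
  | nil => simp
  | cons x t ih =>
    have hx := h x (List.mem_cons_self ..)
    simp only [List.foldl_cons, pvStepA, hx, Bool.false_eq_true, if_false, List.map_cons]
    rw [ih _ (fun y hy => h y (List.mem_cons_of_mem _ hy))]
    simp

-- behind a run of records of slot s in a slot-sorted list, every slot is greater than s
lemma pvSlots_dropWhile_gt (s : String) (l : List (List (String × String)))
    (hub : ∀ x ∈ l, s ≤ pvSlotOf x)
    (hpw : l.Pairwise (fun a b => pvSlotOf a ≤ pvSlotOf b)) :
    ∀ x ∈ l.dropWhile (fun r' => pvSlotOf r' == s), s < pvSlotOf x := by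
  induction l with
  | nil => simp
  | cons y t ih =>
    rw [List.dropWhile_cons]
    split
    · exact ih (fun x hx => hub x (List.mem_cons_of_mem _ hx)) (List.Pairwise.of_cons hpw)
    · rename_i hy
      have hys : pvSlotOf y ≠ s := by simpa using hy
      intro x hx
      rcases List.mem_cons.mp hx with rfl | hxt
      · exact lt_of_le_of_ne (hub x (List.mem_cons_self ..)) (Ne.symm hys)
      · have h1 : s < pvSlotOf y := lt_of_le_of_ne (hub y (List.mem_cons_self ..)) (Ne.symm hys)
        exact lt_of_lt_of_le h1 (List.rel_of_pairwise_cons hpw hxt)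

-- the main invariant: over a slot-sorted list whose slot counts agree with those of the
-- whole record list and whose slots are unvisited, A's loop appends exactly B's run output
lemma loopA_eq_runs (br : List (List (String × String))) (ffw : List (String × String))
    (L : List (List (String × String))) (acc : List String) (vis : PySem.Set String)
    (hpw : L.Pairwise (fun a b => pvSlotOf a ≤ pvSlotOf b))
    (hcnt : ∀ r ∈ L, (br.map pvSlotOf).count (pvSlotOf r) = (L.map pvSlotOf).count (pvSlotOf r))
    (hvis : ∀ r ∈ L, vis.contains (pvSlotOf r) = false) :
    (L.foldl (pvStepA (pvFFslots br) ffw) (acc, vis)).1 = acc ++ pvRuns ffw L := by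
  match L with
  | [] => simp [pvRuns]
  | r :: rest =>
    have hrun : ∀ x ∈ rest.takeWhile (fun r' => pvSlotOf r' == pvSlotOf r), pvSlotOf x = pvSlotOf r := by
      intro x hx
      simpa using List.mem_takeWhile_imp hx
    have hsplit : rest.takeWhile (fun r' => pvSlotOf r' == pvSlotOf r) ++
        rest.dropWhile (fun r' => pvSlotOf r' == pvSlotOf r) = rest :=
      List.takeWhile_append_dropWhile
    have hrestmem : ∀ x ∈ rest.dropWhile (fun r' => pvSlotOf r' == pvSlotOf r), x ∈ rest := by
      intro x hx; exact (List.dropWhile_sublist _).mem hx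
    have hpw' : (rest.dropWhile (fun r' => pvSlotOf r' == pvSlotOf r)).Pairwise
        (fun a b => pvSlotOf a ≤ pvSlotOf b) :=
      List.Pairwise.sublist ((List.dropWhile_sublist _).trans (List.sublist_cons_self r rest)) hpw
    have hrest' : ∀ x ∈ rest.dropWhile (fun r' => pvSlotOf r' == pvSlotOf r), pvSlotOf r < pvSlotOf x :=
      pvSlots_dropWhile_gt (pvSlotOf r) rest
        (fun x hx => List.rel_of_pairwise_cons hpw hx) (List.Pairwise.of_cons hpw)
    have hrestne : ∀ x ∈ rest.dropWhile (fun r' => pvSlotOf r' == pvSlotOf r), pvSlotOf x ≠ pvSlotOf r := by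
      intro x hx; exact ne_of_gt (hrest' x hx)
    have hcountL : ((r :: rest).map pvSlotOf).count (pvSlotOf r) =
        (rest.takeWhile (fun r' => pvSlotOf r' == pvSlotOf r)).length + 1 := by
      have h0 : ((rest.dropWhile (fun r' => pvSlotOf r' == pvSlotOf r)).map pvSlotOf).count (pvSlotOf r) = 0 := by
        rw [List.count_eq_zero]
        intro hmem
        obtain ⟨x, hx, hxe⟩ := List.mem_map.mp hmem
        exact hrestne x hx hxe
      have h1 : ((rest.takeWhile (fun r' => pvSlotOf r' == pvSlotOf r)).map pvSlotOf).count (pvSlotOf r) =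
          (rest.takeWhile (fun r' => pvSlotOf r' == pvSlotOf r)).length := by
        rw [← List.length_map (f := pvSlotOf), List.count_eq_length]
        intro b hb
        obtain ⟨x, hx, rfl⟩ := List.mem_map.mp hb
        exact (hrun x hx).symm
      calc ((r :: rest).map pvSlotOf).count (pvSlotOf r)
          = (((r :: (rest.takeWhile (fun r' => pvSlotOf r' == pvSlotOf r))) ++
              rest.dropWhile (fun r' => pvSlotOf r' == pvSlotOf r)).map pvSlotOf).count (pvSlotOf r) := by
            rw [show (r :: (rest.takeWhile (fun r' => pvSlotOf r' == pvSlotOf r))) ++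
              rest.dropWhile (fun r' => pvSlotOf r' == pvSlotOf r) = r :: rest by
                simp [hsplit]]
        _ = _ := by
            rw [List.map_append, List.count_append, List.map_cons, List.count_cons, h1, h0]
            simp
    have hcnt_s : (br.map pvSlotOf).count (pvSlotOf r) =
        (rest.takeWhile (fun r' => pvSlotOf r' == pvSlotOf r)).length + 1 := by
      rw [hcnt r (List.mem_cons_self ..), hcountL]
    -- recursive-call hypotheses for the remainder after the run
    have hcnt' : ∀ x ∈ rest.dropWhile (fun r' => pvSlotOf r' == pvSlotOf r),
        (br.map pvSlotOf).count (pvSlotOf x) =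
        ((rest.dropWhile (fun r' => pvSlotOf r' == pvSlotOf r)).map pvSlotOf).count (pvSlotOf x) := by
      intro x hx
      have hxL : x ∈ r :: rest := List.mem_cons_of_mem _ (hrestmem x hx)
      rw [hcnt x hxL]
      have : ((r :: rest).map pvSlotOf) =
          ((r :: (rest.takeWhile (fun r' => pvSlotOf r' == pvSlotOf r))).map pvSlotOf) ++
          ((rest.dropWhile (fun r' => pvSlotOf r' == pvSlotOf r)).map pvSlotOf) := by
        rw [← List.map_append]
        congr 1
        simp [hsplit]
      rw [this, List.count_append, List.map_cons, List.count_cons]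
      have h0 : ((rest.takeWhile (fun r' => pvSlotOf r' == pvSlotOf r)).map pvSlotOf).count (pvSlotOf x) = 0 := by
        rw [List.count_eq_zero]
        intro hmem
        obtain ⟨y, hy, hye⟩ := List.mem_map.mp hmem
        exact hrestne x hx (hye ▸ (hrun y hy) ▸ rfl)
      rw [h0]
      simp [Ne.symm (hrestne x hx)]
    -- unfold one step of B
    rw [pvRuns]
    by_cases h2 : (rest.takeWhile (fun r' => pvSlotOf r' == pvSlotOf r)).length + 1 = 2
    · -- First Four slot: the run is one extra record; A emits the winner once
      have hffs : (pvFFslots br).contains (pvSlotOf r) = true :=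
        (pvFFslots_contains_iff br _).mpr (by omega)
      obtain ⟨r2, hr2⟩ := List.length_eq_one_iff.mp (by omega :
        (rest.takeWhile (fun r' => pvSlotOf r' == pvSlotOf r)).length = 1)
      have hs2 : pvSlotOf r2 = pvSlotOf r := hrun r2 (by rw [hr2]; exact List.mem_singleton_self _)
      have hrest_eq : rest = r2 :: rest.dropWhile (fun r' => pvSlotOf r' == pvSlotOf r) := by
        conv_lhs => rw [← hsplit, hr2]
        simp
      have hv := hvis r (List.mem_cons_self ..)
      have hffm : pvSlotOf r ∈ pvFFslots br := (PySem.Set.contains_iff ..).mp hffs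
      have hvm : pvSlotOf r ∉ vis := fun hm => by
        rw [(PySem.Set.contains_iff ..).mpr hm] at hv; cases hv
      have step1 : pvStepA (pvFFslots br) ffw (acc, vis) r =
          (acc ++ [((PySem.Dict.mk ffw).get? (pvSlotOf r)).getD ""], PySem.Set.add vis (pvSlotOf r)) := by
        simp [pvStepA, hffm, hvm]
      have step2 : pvStepA (pvFFslots br) ffw
          (acc ++ [((PySem.Dict.mk ffw).get? (pvSlotOf r)).getD ""], PySem.Set.add vis (pvSlotOf r)) r2 =
          (acc ++ [((PySem.Dict.mk ffw).get? (pvSlotOf r)).getD ""], PySem.Set.add vis (pvSlotOf r)) := by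
        simp [pvStepA, hs2, hffm]
      have hfold : ((r :: rest).foldl (pvStepA (pvFFslots br) ffw) (acc, vis)) =
          ((rest.dropWhile (fun r' => pvSlotOf r' == pvSlotOf r)).foldl
            (pvStepA (pvFFslots br) ffw)
            (acc ++ [((PySem.Dict.mk ffw).get? (pvSlotOf r)).getD ""], PySem.Set.add vis (pvSlotOf r))) := by
        conv_lhs => rw [List.foldl_cons, hrest_eq, List.foldl_cons]
        rw [step1, step2]
      rw [hfold]
      have hvis' : ∀ x ∈ rest.dropWhile (fun r' => pvSlotOf r' == pvSlotOf r),
          (PySem.Set.add vis (pvSlotOf r)).contains (pvSlotOf x) = false := by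
        intro x hx
        have hne := hrestne x hx
        have hvx := hvis x (List.mem_cons_of_mem _ (hrestmem x hx))
        have hnm : ¬ (pvSlotOf x ∈ PySem.Set.add vis (pvSlotOf r)) := by
          simp only [PySem.Set.mem_add]
          rintro (h | h)
          · rw [(PySem.Set.contains_iff ..).mpr h] at hvx; cases hvx
          · exact hne h
        exact Bool.eq_false_iff.mpr (fun hc => hnm ((PySem.Set.contains_iff ..).mp hc))
      rw [loopA_eq_runs br ffw _ _ _ hpw' hcnt' hvis']
      simp [hr2]
    · -- not a First Four slot: A emits each team of the run
      have hffs : (pvFFslots br).contains (pvSlotOf r) = false := by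
        have : ¬ ((pvFFslots br).contains (pvSlotOf r) = true) := by
          rw [pvFFslots_contains_iff]
          omega
        simpa using this
      have hnoff : ∀ x ∈ r :: rest.takeWhile (fun r' => pvSlotOf r' == pvSlotOf r),
          (pvFFslots br).contains (pvSlotOf x) = false := by
        intro x hx
        rcases List.mem_cons.mp hx with rfl | hx
        · exact hffs
        · rw [hrun x hx]; exact hffs
      have hLsplit : r :: rest = (r :: rest.takeWhile (fun r' => pvSlotOf r' == pvSlotOf r)) ++
          rest.dropWhile (fun r' => pvSlotOf r' == pvSlotOf r) := by
        simp [hsplit]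
      rw [hLsplit, List.foldl_append, foldA_no_ff _ _ _ _ _ hnoff]
      have hvis' : ∀ x ∈ rest.dropWhile (fun r' => pvSlotOf r' == pvSlotOf r),
          vis.contains (pvSlotOf x) = false := fun x hx =>
        hvis x (List.mem_cons_of_mem _ (hrestmem x hx))
      rw [loopA_eq_runs br ffw _ _ _ hpw' hcnt' hvis']
      rw [if_neg (show ¬ (((List.takeWhile (fun r' => pvSlotOf r' == pvSlotOf r) rest).length + 1 == 2) = true) by
        simp; omega)]
      simp
termination_by L.length
decreasing_by
  all_goals
    have h := (List.dropWhile_sublist (l := rest) (fun r' => pvSlotOf r' == pvSlotOf r)).length_le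
    simp only [List.length_cons]
    omega

theorem build_64_from_68_spec : Claim_equal_build_64_from_68 := by
  intro br ffw _ _
  unfold Spec_build_64_from_68 build_64_from_68 build_64_from_68_alt
  have hperm : ((PySem.List.sorted br pvSlotOf false).map pvSlotOf).Perm (br.map pvSlotOf) :=
    (PySem.List.sorted_perm br pvSlotOf false).map pvSlotOf
  have := loopA_eq_runs br ffw (PySem.List.sorted br pvSlotOf false) [] PySem.Set.empty
    (PySem.List.sorted_pairwise br pvSlotOf)
    (fun r _ => (hperm.count_eq (pvSlotOf r)).symm)
    (fun r _ => by simp [PySem.Set.empty])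
  simpa using this
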